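-- pv_equiv track=rewrite | github.com/amirakm12/aisis | aisis_complete.py | _apply_blur
-- ===== SOURCE A (Python) =====
-- def _apply_blur(image_data):
--     """Apply blur effect"""
--     # Simple blur simulation
--     if len(image_data) < 3:
--         return image_data
--
--     blurred = []
--     for i in range(len(image_data)):
--         if i == 0:
--             blurred.append(image_data[i])
--         elif i == len(image_data) - 1:
--             blurred.append(image_data[i])
--         else:
--             blurred.append((image_data[i-1] + image_data[i] + image_data[i+1]) // 3)
--     return blurred
-- ===== SOURCE B (Python) =====
-- def _apply_blur(image_data):
--     """Apply blur effect"""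
--     if len(image_data) < 3:
--         return image_data
--     # prefix[k] = sum of the first k samples; window sum = difference of prefixes
--     prefix = [0]
--     for v in image_data:
--         prefix.append(prefix[-1] + v)
--     out = [image_data[0]]
--     for i in range(1, len(image_data) - 1):
--         out.append((prefix[i + 2] - prefix[i - 1]) // 3)
--     out.append(image_data[-1])
--     return out
-- ===== Notes on version B (the rewrite author's own statement) =====
-- stated objective: alternative
-- what changed: Replaces A's per-index three-neighbour sum with a prefix-sum array built in a first pass, each interior output taken as the difference (prefix[i+2]-prefix[i-1])//3 in a second pass, endpoints handled outside the loop.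
import Mathlib
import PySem

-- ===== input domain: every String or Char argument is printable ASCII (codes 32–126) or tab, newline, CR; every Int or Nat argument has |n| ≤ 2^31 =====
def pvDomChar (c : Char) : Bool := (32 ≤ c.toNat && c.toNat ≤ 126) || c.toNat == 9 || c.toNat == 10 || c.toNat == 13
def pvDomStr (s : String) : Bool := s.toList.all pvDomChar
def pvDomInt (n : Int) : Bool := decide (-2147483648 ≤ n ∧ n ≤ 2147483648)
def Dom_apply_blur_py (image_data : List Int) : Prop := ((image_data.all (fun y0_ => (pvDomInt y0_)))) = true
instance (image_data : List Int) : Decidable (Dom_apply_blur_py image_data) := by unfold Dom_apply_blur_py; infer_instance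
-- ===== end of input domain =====

-- B replaces A's direct three-neighbour sums by a prefix-sum array built in a first pass,
-- each interior output being (prefix[i+2]-prefix[i-1])//3 (objective: alternative).


-- ===== PORT A =====
-- every index used (i-1, i, i+1 within the branch guards) is in range, so the
-- pyGetD default 0 is never returned
def apply_blur_py (image_data : List Int) : List Int :=
  if image_data.length < 3 then image_data
  else
    (PySem.List.pyRange 0 (image_data.length : Int) 1).foldl
      (fun blurred i =>
        if i = 0 then blurred ++ [PySem.List.pyGetD image_data i 0]
        else if i = (image_data.length : Int) - 1 then blurred ++ [PySem.List.pyGetD image_data i 0]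
        else blurred ++ [PySem.Int.floordiv
          (PySem.List.pyGetD image_data (i - 1) 0 + PySem.List.pyGetD image_data i 0
            + PySem.List.pyGetD image_data (i + 1) 0) 3]) []

-- ===== PORT B =====
-- 'prefix = [0]; for v in image_data: prefix.append(prefix[-1] + v)'
def pvPrefixBuild (image_data : List Int) : List Int :=
  image_data.foldl (fun p v => p ++ [PySem.List.pyGetD p (-1) 0 + v]) [0]

def apply_blur_py_alt (image_data : List Int) : List Int :=
  if image_data.length < 3 then image_data
  else
    let pre := pvPrefixBuild image_data
    ((PySem.List.pyRange 1 ((image_data.length : Int) - 1) 1).foldl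
        (fun out i => out ++ [PySem.Int.floordiv
          (PySem.List.pyGetD pre (i + 2) 0 - PySem.List.pyGetD pre (i - 1) 0) 3])
        [PySem.List.pyGetD image_data 0 0])
      ++ [PySem.List.pyGetD image_data (-1) 0]

-- ===== PRECONDITION & SPEC =====
def Spec_apply_blur_py (image_data : List Int) (out : List Int) : Prop := out = apply_blur_py_alt image_data
instance (image_data : List Int) (out : List Int) : Decidable (Spec_apply_blur_py image_data out) := by unfold Spec_apply_blur_py; infer_instance

-- ===== CLAIM (what is proved, stated in full; the proofs are below) =====
def Claim_equal_apply_blur_py : Prop := ∀ (image_data : List Int), Dom_apply_blur_py image_data → Spec_apply_blur_py image_data (apply_blur_py image_data)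

-- ===== LEMMAS AND PROOFS =====

-- running-sum list: pvPsums s xs = [s+x0, s+x0+x1, …]
def pvPsums (s : Int) : List Int → List Int
  | [] => []
  | v :: t => (s + v) :: pvPsums (s + v) t

theorem pvPsums_length (s : Int) (xs : List Int) : (pvPsums s xs).length = xs.length := by
  induction xs generalizing s with
  | nil => rfl
  | cons v t ih => simp [pvPsums, ih]

theorem pvPsums_getElem (xs : List Int) (s : Int) (k : Nat) (h : k < xs.length) :
    (pvPsums s xs)[k]'(by rw [pvPsums_length]; exact h) = s + (xs.take (k + 1)).sum := by
  induction xs generalizing s k with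
  | nil => simp at h
  | cons v t ih =>
    cases k with
    | zero => simp [pvPsums]
    | succ j =>
      have hj : j < t.length := by simpa using h
      simp only [pvPsums, List.getElem_cons_succ, List.take_succ_cons, List.sum_cons]
      rw [ih (s + v) j hj]
      ring

theorem pvFoldl_prefix (xs : List Int) : ∀ (p : List Int) (hp : p ≠ []),
    xs.foldl (fun p v => p ++ [PySem.List.pyGetD p (-1) 0 + v]) p
      = p ++ pvPsums (p.getLast hp) xs := by
  induction xs with
  | nil => intro p hp; simp [pvPsums]
  | cons v t ih =>
    intro p hp
    have hne : p ++ [p.getLast hp + v] ≠ [] := by simp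
    rw [List.foldl_cons, PySem.List.pyGetD_neg_one p 0 hp, ih (p ++ [p.getLast hp + v]) hne]
    rw [List.getLast_append_of_ne_nil (by simp)]
    · simp [pvPsums]
    · simp

theorem pvPrefixBuild_eq (xs : List Int) :
    pvPrefixBuild xs = 0 :: pvPsums 0 xs := by
  unfold pvPrefixBuild
  rw [pvFoldl_prefix xs [0] (by simp)]
  rfl

theorem pvPrefixBuild_length (xs : List Int) :
    (pvPrefixBuild xs).length = xs.length + 1 := by
  rw [pvPrefixBuild_eq]; simp [pvPsums_length]

theorem pvPrefix_getElem (xs : List Int) (k : Nat) (h : k ≤ xs.length) :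
    (pvPrefixBuild xs)[k]'(by rw [pvPrefixBuild_length]; omega) = (xs.take k).sum := by
  simp only [pvPrefixBuild_eq]
  cases k with
  | zero => simp
  | succ j =>
    have hj : j < xs.length := by omega
    simp only [List.getElem_cons_succ]
    rw [pvPsums_getElem xs 0 j hj]
    ring

theorem pyGetD_neg_one' (xs : List Int) (h : 0 < xs.length) (d : Int) :
    PySem.List.pyGetD xs (-1) d = xs[xs.length - 1] := by
  rw [PySem.List.pyGetD_neg_one xs d (by intro hc; subst hc; simp at h)]
  exact (List.getLast_eq_getElem _)

theorem blur_eq (xs : List Int) : apply_blur_py xs = apply_blur_py_alt xs := by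
  by_cases h : xs.length < 3
  · simp [apply_blur_py, apply_blur_py_alt, h]
  · have hn : 3 ≤ xs.length := by omega
    have hA : apply_blur_py xs =
        (List.range xs.length).map (fun (k : Nat) =>
          if (k : Int) = 0 then PySem.List.pyGetD xs (k : Int) 0
          else if (k : Int) = (xs.length : Int) - 1 then PySem.List.pyGetD xs (k : Int) 0
          else PySem.Int.floordiv
            (PySem.List.pyGetD xs ((k : Int) - 1) 0 + PySem.List.pyGetD xs (k : Int) 0
              + PySem.List.pyGetD xs ((k : Int) + 1) 0) 3) := by
      unfold apply_blur_py
      rw [if_neg h]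
      have hfun : (fun (blurred : List Int) (i : Int) =>
          if i = 0 then blurred ++ [PySem.List.pyGetD xs i 0]
          else if i = (xs.length : Int) - 1 then blurred ++ [PySem.List.pyGetD xs i 0]
          else blurred ++ [PySem.Int.floordiv
            (PySem.List.pyGetD xs (i - 1) 0 + PySem.List.pyGetD xs i 0
              + PySem.List.pyGetD xs (i + 1) 0) 3]) =
          (fun blurred i => blurred ++ [
            if i = 0 then PySem.List.pyGetD xs i 0
            else if i = (xs.length : Int) - 1 then PySem.List.pyGetD xs i 0
            else PySem.Int.floordiv
              (PySem.List.pyGetD xs (i - 1) 0 + PySem.List.pyGetD xs i 0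
                + PySem.List.pyGetD xs (i + 1) 0) 3]) := by
        funext acc i; split_ifs <;> rfl
      rw [hfun, PySem.List.foldl_append_singleton_eq_map, PySem.List.pyRange_one,
        List.map_map]
      have h2 : ((xs.length : Int) - 0).toNat = xs.length := by omega
      rw [h2]
      simp only [List.nil_append]
      apply List.map_congr_left
      intro k _
      simp
    rw [hA]
    unfold apply_blur_py_alt
    rw [if_neg h]
    simp only []
    rw [PySem.List.foldl_append_singleton_eq_map, PySem.List.pyRange_one, List.singleton_append]
    have hmlen : (((xs.length : Int) - 1 - 1).toNat) = xs.length - 2 := by omega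
    apply List.ext_getElem
    · simp only [List.length_map, List.length_range, List.length_append, List.length_cons,
        List.length_nil, hmlen]
      omega
    · intro i hi1 hi2
      have hin : i < xs.length := by simpa using hi1
      rw [List.getElem_map, List.getElem_range]
      by_cases h0 : i = 0
      · subst h0
        rw [if_pos (by norm_num)]
        simp
      · obtain ⟨j, rfl⟩ : ∃ j, i = j + 1 := ⟨i - 1, by omega⟩
        by_cases hl : j + 1 = xs.length - 1
        · rw [if_neg (by omega), if_pos (by omega)]
          rw [List.getElem_append_right
            (by simp only [List.length_cons, List.length_map, List.length_range, hmlen]; omega)]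
          simp only [List.length_cons, List.length_map, List.length_range, hmlen]
          simp only [show j + 1 - (xs.length - 2 + 1) = 0 from by omega, List.getElem_cons_zero]
          rw [pyGetD_neg_one' xs (by omega)]
          rw [PySem.List.pyGetD_eq_getElem _ _ (by omega) (by omega)]
          congr 1
        · rw [if_neg (by omega), if_neg (by omega)]
          rw [List.getElem_append_left
            (by simp only [List.length_cons, List.length_map, List.length_range, hmlen]; omega)]
          rw [List.getElem_cons_succ, List.getElem_map, List.getElem_map, List.getElem_range]
          have hj2 : j < xs.length - 2 := by omega
          rw [show (1 + (j : Int) + 2) = ((j + 3 : Nat) : Int) from by push_cast; ring,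
              show (1 + (j : Int) - 1) = ((j : Nat) : Int) from by ring]
          rw [PySem.List.pyGetD_eq_getElem (pvPrefixBuild xs) _ (by omega)
                (by rw [pvPrefixBuild_length]; omega),
              PySem.List.pyGetD_eq_getElem (pvPrefixBuild xs) _ (by omega)
                (by rw [pvPrefixBuild_length]; omega)]
          simp only [Int.toNat_natCast]
          rw [pvPrefix_getElem xs (j + 3) (by omega), pvPrefix_getElem xs j (by omega)]
          rw [PySem.List.pyGetD_eq_getElem _ _ (by omega) (by omega),
              PySem.List.pyGetD_eq_getElem _ _ (by omega) (by omega),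
              PySem.List.pyGetD_eq_getElem _ _ (by omega) (by omega)]
          rw [List.sum_take_succ xs (j + 2) (by omega), List.sum_take_succ xs (j + 1) (by omega),
              List.sum_take_succ xs j (by omega)]
          congr 1
          simp only [show ((j + 1 : Nat) - 1 : Int).toNat = j from by omega,
            show ((j + 1 : Nat) : Int).toNat = j + 1 from by omega,
            show (((j + 1 : Nat) : Int) + 1).toNat = j + 2 from by omega]
          ring

-- ===== VERDICT (by name: the statement is the Claim_ definition above) =====
theorem apply_blur_py_spec : Claim_equal_apply_blur_py := by
  intro xs _
  unfold Spec_apply_blur_py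
  exact blur_eq xs
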